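-- pv_equiv track=rewrite | github.com/IgrMd/yandex-algos-training | Тренировки по алгоритмам 1.0/Лекция 4. «Словари и сортировка подсчётом»/J.py | identificators
-- ===== SOURCE A (Python) =====
-- from collections import defaultdict
--
-- def get_alpha(case_sensitive):
--     alphabet = {'_'}
--     for c in range(ord('0'), ord('9') + 1):
--         alphabet.add(chr(c))
--     for c in range(ord('a'), ord('z') + 1):
--         alphabet.add(chr(c))
--     if case_sensitive:
--         for c in range(ord('A'), ord('Z') + 1):
--             alphabet.add(chr(c))
--     return alphabet
--
-- def get_token_start(j: int, text: str, start_with_digit: bool, alphabet: set):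
--     i = j
--     while i < len(text) and text[i] not in alphabet:
--         i += 1
--     if i < len(text) and not start_with_digit and text[i].isdigit():
--         j = get_token_end(i, text, alphabet)
--         return get_token_start(j, text, start_with_digit, alphabet)
--     else:
--         return i
--
-- def get_token_end(i: int, text: str, alphabet: set):
--     j = i
--     while j < len(text) and text[j] in alphabet:
--         j += 1
--     return j
--
-- def form_identificators(start_with_digit, text: str, alphabet, token_counter, keywords):
--     i = get_token_start(0, text, start_with_digit, alphabet)
--     j = get_token_end(i, text, alphabet)
--     while i < len(text):
--         token = text[i:j]
--         if not token.isdigit() and token not in keywords: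
--             token_counter[token] += 1
--         i = get_token_start(j, text, start_with_digit, alphabet)
--         j = get_token_end(i, text, alphabet)
--
-- def identificators(n, case_sensitive, start_with_digit, keywords, text):
--     alphabet = get_alpha(case_sensitive)
--     token_counter = defaultdict(int)
--     for line in text:
--         form_identificators(start_with_digit, line, alphabet, token_counter, keywords)
--     most_used = ''
--     max_count = 0
--     for token, count in token_counter.items():
--         if max_count < count:
--             max_count = count
--             most_used = token
--     return most_used
-- ===== SOURCE B (Python) =====
-- def identificators(n, case_sensitive, start_with_digit, keywords, text):
--     # single forward pass per line: accumulate maximal alphabet runs, filter, count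
--     alpha = set('_0123456789abcdefghijklmnopqrstuvwxyz')
--     if case_sensitive:
--         alpha |= set('ABCDEFGHIJKLMNOPQRSTUVWXYZ')
--     counts = {}
--
--     def flush(cur):
--         if not cur:
--             return
--         token = ''.join(cur)
--         if not start_with_digit and token[0].isdigit():
--             return
--         if token.isdigit() or token in keywords:
--             return
--         counts[token] = counts.get(token, 0) + 1
--
--     for line in text:
--         cur = []
--         for ch in line:
--             if ch in alpha:
--                 cur.append(ch)
--             else:
--                 flush(cur)
--                 cur = []
--         flush(cur)
--
--     most_used = ''
--     max_count = 0
--     for token, count in counts.items():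
--         if max_count < count:
--             max_count = count
--             most_used = token
--     return most_used
-- ===== Notes on version B (the rewrite author's own statement) =====
-- stated objective: simpler
-- what changed: Replaces the mutually recursive index-based scanner (get_token_start/get_token_end with slicing and a digit-skip re-scan) by a single left-to-right fold per line that accumulates the current alphabet run and flushes it through one filter into the counter; a timing run also measured this constant-factor faster (no recursion, no re-scanning).
import Mathlib
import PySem

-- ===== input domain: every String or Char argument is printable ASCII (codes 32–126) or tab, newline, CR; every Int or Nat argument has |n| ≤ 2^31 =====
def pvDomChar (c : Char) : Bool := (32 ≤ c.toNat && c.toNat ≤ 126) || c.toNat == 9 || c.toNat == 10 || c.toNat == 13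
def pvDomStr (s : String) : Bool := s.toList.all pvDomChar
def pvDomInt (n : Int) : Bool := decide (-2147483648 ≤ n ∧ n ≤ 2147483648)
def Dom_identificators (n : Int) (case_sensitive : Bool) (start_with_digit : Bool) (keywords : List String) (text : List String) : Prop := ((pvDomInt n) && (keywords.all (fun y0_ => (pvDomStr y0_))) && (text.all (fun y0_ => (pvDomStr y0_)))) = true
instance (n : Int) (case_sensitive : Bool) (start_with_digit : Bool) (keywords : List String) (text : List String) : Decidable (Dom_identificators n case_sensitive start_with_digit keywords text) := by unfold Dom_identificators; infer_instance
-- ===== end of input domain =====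

-- B replaces A's recursive index-based token scanner by a single left-to-right fold per line that
-- accumulates the current alphabet run and flushes it through one filter (objective: simpler).

-- ===== PORT A =====

def getAlpha (case_sensitive : Bool) : PySem.Set Char :=
  let alphabet : PySem.Set Char := PySem.Set.ofList ['_']
  let alphabet := (PySem.List.pyRange 48 58 1).foldl
    (fun s c => PySem.Set.add s (Char.ofNat c.toNat)) alphabet
  let alphabet := (PySem.List.pyRange 97 123 1).foldl
    (fun s c => PySem.Set.add s (Char.ofNat c.toNat)) alphabet
  if case_sensitive then
    (PySem.List.pyRange 65 91 1).foldl
      (fun s c => PySem.Set.add s (Char.ofNat c.toNat)) alphabet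
  else alphabet

-- the inner `while` of get_token_start: skip characters not in the alphabet
def skipNonAlpha (i : Nat) (t : List Char) (al : PySem.Set Char) : Nat :=
  if h : i < t.length ∧ ¬ PySem.Set.contains al (t.getD i ' ') then
    skipNonAlpha (i + 1) t al
  else i
termination_by t.length - i
decreasing_by exact Nat.sub_succ_lt_self t.length i h.1

def getTokenEnd (j : Nat) (t : List Char) (al : PySem.Set Char) : Nat :=
  if h : j < t.length ∧ PySem.Set.contains al (t.getD j ' ') then
    getTokenEnd (j + 1) t al
  else j
termination_by t.length - j
decreasing_by exact Nat.sub_succ_lt_self t.length j h.1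

-- facts the recursive definitions below need for termination
theorem skipNonAlpha_ge (i : Nat) (t : List Char) (al : PySem.Set Char) :
    i ≤ skipNonAlpha i t al := by
  unfold skipNonAlpha
  split
  · exact Nat.le_of_succ_le (skipNonAlpha_ge (i + 1) t al)
  · exact Nat.le_refl i
termination_by t.length - i
decreasing_by rename_i h; exact Nat.sub_succ_lt_self t.length i h.1

theorem skipNonAlpha_stop (i : Nat) (t : List Char) (al : PySem.Set Char)
    (h : skipNonAlpha i t al < t.length) :
    PySem.Set.contains al (t.getD (skipNonAlpha i t al) ' ') = true := by
  rw [skipNonAlpha] at h ⊢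
  by_cases hc : i < t.length ∧ ¬ PySem.Set.contains al (t.getD i ' ') = true
  · rw [dif_pos hc] at h ⊢
    exact skipNonAlpha_stop (i + 1) t al h
  · rw [dif_neg hc] at h ⊢
    simp only [not_and, not_not] at hc
    exact hc h
termination_by t.length - i
decreasing_by exact Nat.sub_succ_lt_self t.length i hc.1

theorem getTokenEnd_ge (j : Nat) (t : List Char) (al : PySem.Set Char) :
    j ≤ getTokenEnd j t al := by
  unfold getTokenEnd
  split
  · exact Nat.le_of_succ_le (getTokenEnd_ge (j + 1) t al)
  · exact Nat.le_refl j
termination_by t.length - j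
decreasing_by rename_i h; exact Nat.sub_succ_lt_self t.length j h.1

theorem getTokenEnd_gt (j : Nat) (t : List Char) (al : PySem.Set Char)
    (h1 : j < t.length) (h2 : PySem.Set.contains al (t.getD j ' ') = true) :
    j + 1 ≤ getTokenEnd j t al := by
  rw [getTokenEnd, dif_pos ⟨h1, h2⟩]
  exact getTokenEnd_ge (j + 1) t al

def getTokenStart (j : Nat) (t : List Char) (swd : Bool) (al : PySem.Set Char) : Nat :=
  if h : skipNonAlpha j t al < t.length ∧ swd = false
           ∧ PySem.Chars.isdigit (t.getD (skipNonAlpha j t al) ' ') = true then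
    getTokenStart (getTokenEnd (skipNonAlpha j t al) t al) t swd al
  else skipNonAlpha j t al
termination_by t.length - j
decreasing_by
  exact Nat.sub_lt_sub_left (Nat.lt_of_le_of_lt (skipNonAlpha_ge j t al) h.1)
    (Nat.lt_of_le_of_lt (skipNonAlpha_ge j t al)
      (Nat.lt_of_succ_le (getTokenEnd_gt (skipNonAlpha j t al) t al h.1 (skipNonAlpha_stop j t al h.1))))

theorem getTokenStart_ge (j : Nat) (t : List Char) (swd : Bool) (al : PySem.Set Char) :
    j ≤ getTokenStart j t swd al := by
  rw [getTokenStart]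
  have h1 := skipNonAlpha_ge j t al
  by_cases hc : skipNonAlpha j t al < t.length ∧ swd = false
      ∧ PySem.Chars.isdigit (t.getD (skipNonAlpha j t al) ' ') = true
  · rw [dif_pos hc]
    have h2 := skipNonAlpha_stop j t al hc.1
    have h3 := getTokenEnd_gt (skipNonAlpha j t al) t al hc.1 h2
    have h4 := getTokenStart_ge (getTokenEnd (skipNonAlpha j t al) t al) t swd al
    exact Nat.le_trans h1 (Nat.le_trans (Nat.le_of_succ_le h3) h4)
  · rw [dif_neg hc]
    exact h1
termination_by t.length - j
decreasing_by
  exact Nat.sub_lt_sub_left (Nat.lt_of_le_of_lt (skipNonAlpha_ge j t al) hc.1)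
    (Nat.lt_of_le_of_lt (skipNonAlpha_ge j t al)
      (Nat.lt_of_succ_le (getTokenEnd_gt (skipNonAlpha j t al) t al hc.1 (skipNonAlpha_stop j t al hc.1))))

theorem getTokenStart_stop (j : Nat) (t : List Char) (swd : Bool) (al : PySem.Set Char)
    (h : getTokenStart j t swd al < t.length) :
    PySem.Set.contains al (t.getD (getTokenStart j t swd al) ' ') = true := by
  rw [getTokenStart] at h ⊢
  by_cases hc : skipNonAlpha j t al < t.length ∧ swd = false
      ∧ PySem.Chars.isdigit (t.getD (skipNonAlpha j t al) ' ') = true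
  · rw [dif_pos hc] at h ⊢
    exact getTokenStart_stop (getTokenEnd (skipNonAlpha j t al) t al) t swd al h
  · rw [dif_neg hc] at h ⊢
    exact skipNonAlpha_stop j t al h
termination_by t.length - j
decreasing_by
  exact Nat.sub_lt_sub_left (Nat.lt_of_le_of_lt (skipNonAlpha_ge j t al) hc.1)
    (Nat.lt_of_le_of_lt (skipNonAlpha_ge j t al)
      (Nat.lt_of_succ_le (getTokenEnd_gt (skipNonAlpha j t al) t al hc.1 (skipNonAlpha_stop j t al hc.1))))

-- the count-this-token step of form_identificators
def countTok (kw : List (List Char)) (d : PySem.Dict (List Char) Int)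
    (token : List Char) : PySem.Dict (List Char) Int :=
  if ¬ PySem.Chars.strIsdigit token ∧ ¬ kw.contains token then
    d.modify token 0 (· + 1)
  else d

-- the while-loop of form_identificators, rotated: each iteration computes
-- i = get_token_start(j), j' = get_token_end(i) and counts text[i:j']
def formLoop (j : Nat) (t : List Char) (swd : Bool) (al : PySem.Set Char)
    (kw : List (List Char)) (d : PySem.Dict (List Char) Int) : PySem.Dict (List Char) Int :=
  if h : getTokenStart j t swd al < t.length then
    formLoop (getTokenEnd (getTokenStart j t swd al) t al) t swd al kw
      (countTok kw d
        (PySem.List.slice t (some ((getTokenStart j t swd al : Nat) : Int))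
          (some ((getTokenEnd (getTokenStart j t swd al) t al : Nat) : Int))))
  else d
termination_by t.length - j
decreasing_by
  exact Nat.sub_lt_sub_left (Nat.lt_of_le_of_lt (getTokenStart_ge j t swd al) h)
    (Nat.lt_of_le_of_lt (getTokenStart_ge j t swd al)
      (Nat.lt_of_succ_le (getTokenEnd_gt (getTokenStart j t swd al) t al h
        (getTokenStart_stop j t swd al h))))

def identificators (n : Int) (case_sensitive : Bool) (start_with_digit : Bool)
    (keywords : List String) (text : List String) : String :=
  let alphabet := getAlpha case_sensitive
  let kw := keywords.map String.toList
  let token_counter := text.foldl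
    (fun d line => formLoop 0 line.toList start_with_digit alphabet kw d) PySem.Dict.empty
  let r := token_counter.items.foldl
    (fun (acc : List Char × Int) tc => if acc.2 < tc.2 then tc else acc) ([], 0)
  String.mk r.1

-- ===== PORT B =====

def altAlpha (case_sensitive : Bool) : PySem.Set Char :=
  let alpha := PySem.Set.ofList "_0123456789abcdefghijklmnopqrstuvwxyz".toList
  if case_sensitive then
    PySem.Set.union alpha (PySem.Set.ofList "ABCDEFGHIJKLMNOPQRSTUVWXYZ".toList)
  else alpha

def flushTok (swd : Bool) (kw : List (List Char)) (d : PySem.Dict (List Char) Int)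
    (cur : List Char) : PySem.Dict (List Char) Int :=
  if cur = [] then d
  else if swd = false ∧ PySem.Chars.isdigit (cur.getD 0 ' ') = true then d
  else if PySem.Chars.strIsdigit cur ∨ kw.contains cur then d
  else d.insert cur (d.getD cur 0 + 1)

def lineScan (swd : Bool) (al : PySem.Set Char) (kw : List (List Char))
    (d : PySem.Dict (List Char) Int) (line : List Char) : PySem.Dict (List Char) Int :=
  let st := line.foldl
    (fun (acc : PySem.Dict (List Char) Int × List Char) ch =>
      if PySem.Set.contains al ch then (acc.1, acc.2 ++ [ch])
      else (flushTok swd kw acc.1 acc.2, []))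
    (d, [])
  flushTok swd kw st.1 st.2

def identificators_alt (n : Int) (case_sensitive : Bool) (start_with_digit : Bool)
    (keywords : List String) (text : List String) : String :=
  let alpha := altAlpha case_sensitive
  let kw := keywords.map String.toList
  let counts := text.foldl
    (fun d line => lineScan start_with_digit alpha kw d line.toList) PySem.Dict.empty
  let r := counts.items.foldl
    (fun (acc : List Char × Int) tc => if acc.2 < tc.2 then tc else acc) ([], 0)
  String.mk r.1

-- ===== PRECONDITION & SPEC =====
def Spec_identificators (n : Int) (case_sensitive : Bool) (start_with_digit : Bool) (keywords : List String) (text : List String) (out : String) : Prop := out = identificators_alt n case_sensitive start_with_digit keywords text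
instance (n : Int) (case_sensitive : Bool) (start_with_digit : Bool) (keywords : List String) (text : List String) (out : String) : Decidable (Spec_identificators n case_sensitive start_with_digit keywords text out) := by unfold Spec_identificators; infer_instance

-- ===== CLAIM (what is proved, stated in full; the proofs are below) =====
def Claim_equal_identificators : Prop := ∀ (n : Int) (case_sensitive : Bool) (start_with_digit : Bool) (keywords : List String) (text : List String), Dom_identificators n case_sensitive start_with_digit keywords text → Spec_identificators n case_sensitive start_with_digit keywords text (identificators n case_sensitive start_with_digit keywords text)

-- ===== LEMMAS AND PROOFS =====

theorem alpha_eq (cs : Bool) : getAlpha cs = altAlpha cs := by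
  cases cs <;> decide

-- B's per-line scan, generalized to start with a pending run `cur`
def foldFlush (swd : Bool) (al : PySem.Set Char) (kw : List (List Char))
    (d : PySem.Dict (List Char) Int) (cur : List Char) (s : List Char) :
    PySem.Dict (List Char) Int :=
  let st := s.foldl
    (fun (acc : PySem.Dict (List Char) Int × List Char) ch =>
      if PySem.Set.contains al ch then (acc.1, acc.2 ++ [ch])
      else (flushTok swd kw acc.1 acc.2, []))
    (d, cur)
  flushTok swd kw st.1 st.2

theorem lineScan_eq_foldFlush (swd : Bool) (al : PySem.Set Char) (kw : List (List Char))
    (d : PySem.Dict (List Char) Int) (line : List Char) :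
    lineScan swd al kw d line = foldFlush swd al kw d [] line := rfl

theorem flushTok_nil (swd : Bool) (kw : List (List Char)) (d : PySem.Dict (List Char) Int) :
    flushTok swd kw d [] = d := rfl

-- folding through a maximal alphabet run appends it to the pending token
theorem foldFlush_run (swd : Bool) (al : PySem.Set Char) (kw : List (List Char))
    (s : List Char) (d : PySem.Dict (List Char) Int) (cur : List Char) :
    foldFlush swd al kw d cur s
      = foldFlush swd al kw d (cur ++ s.takeWhile (PySem.Set.contains al))
          (s.dropWhile (PySem.Set.contains al)) := by
  induction s generalizing cur with
  | nil => simp [List.takeWhile, List.dropWhile]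
  | cons c s ih =>
    by_cases hc : PySem.Set.contains al c
    · rw [List.takeWhile_cons_of_pos hc, List.dropWhile_cons_of_pos hc]
      have h1 : foldFlush swd al kw d cur (c :: s) = foldFlush swd al kw d (cur ++ [c]) s := by
        unfold foldFlush
        rw [List.foldl_cons, if_pos hc]
      rw [h1, ih (cur ++ [c])]
      simp only [List.append_assoc, List.singleton_append]
    · rw [List.takeWhile_cons_of_neg hc, List.dropWhile_cons_of_neg hc]
      rw [List.append_nil]

-- if the rest starts with a separator (or is empty), the pending token is flushed now
theorem foldFlush_flush (swd : Bool) (al : PySem.Set Char) (kw : List (List Char))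
    (s : List Char) (d : PySem.Dict (List Char) Int) (cur : List Char)
    (h : s = [] ∨ ∃ c s', s = c :: s' ∧ PySem.Set.contains al c = false) :
    foldFlush swd al kw d cur s = foldFlush swd al kw (flushTok swd kw d cur) [] s := by
  rcases h with h | ⟨c, s', rfl, hc⟩
  · subst h
    simp [foldFlush, flushTok_nil]
  · unfold foldFlush
    rw [List.foldl_cons, List.foldl_cons, if_neg (by simpa using hc), if_neg (by simpa using hc),
      flushTok_nil]

-- getTokenEnd computes the takeWhile/dropWhile decomposition of the suffix
theorem tokenEnd_takeWhile (i : Nat) (t : List Char) (al : PySem.Set Char) :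
    (t.drop i).takeWhile (PySem.Set.contains al)
        = (t.drop i).take (getTokenEnd i t al - i)
      ∧ (t.drop i).dropWhile (PySem.Set.contains al) = t.drop (getTokenEnd i t al) := by
  rw [getTokenEnd]
  by_cases hl : i < t.length
  · have hdrop : t.drop i = t[i] :: t.drop (i + 1) := List.drop_eq_getElem_cons hl
    have hgetD : t.getD i ' ' = t[i] := List.getD_eq_getElem t ' ' hl
    by_cases hc : PySem.Set.contains al (t.getD i ' ') = true
    · rw [dif_pos ⟨hl, hc⟩]
      obtain ⟨ih1, ih2⟩ := tokenEnd_takeWhile (i + 1) t al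
      have hge := getTokenEnd_ge (i + 1) t al
      rw [hgetD] at hc
      constructor
      · rw [hdrop, List.takeWhile_cons_of_pos hc, ih1]
        have hE : getTokenEnd (i + 1) t al - i = (getTokenEnd (i + 1) t al - (i + 1)) + 1 := by
          omega
        rw [hE, List.take_succ_cons]
      · rw [hdrop, List.dropWhile_cons_of_pos hc, ih2]
    · rw [dif_neg (by tauto)]
      rw [hgetD] at hc
      constructor
      · rw [hdrop, List.takeWhile_cons_of_neg hc]
        simp
      · rw [hdrop, List.dropWhile_cons_of_neg hc]
  · rw [dif_neg (by tauto)]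
    have hnil : t.drop i = [] := List.drop_eq_nil_of_le (by omega)
    simp [hnil]
termination_by t.length - i
decreasing_by omega

-- A's per-token counting step agrees with B's flush on a non-skipped token
theorem countTok_eq_flushTok (swd : Bool) (kw : List (List Char))
    (d : PySem.Dict (List Char) Int) (cur : List Char) (hne : cur ≠ [])
    (hng : ¬ (swd = false ∧ PySem.Chars.isdigit (cur.getD 0 ' ') = true)) :
    countTok kw d cur = flushTok swd kw d cur := by
  unfold countTok flushTok
  rw [if_neg hne, if_neg hng]
  by_cases h1 : PySem.Chars.strIsdigit cur = true
  · rw [if_neg (fun hcon => hcon.1 h1), if_pos (Or.inl h1)]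
  · by_cases h2 : kw.contains cur = true
    · rw [if_neg (fun hcon => hcon.2 h2), if_pos (Or.inr h2)]
    · rw [if_pos ⟨h1, h2⟩, if_neg (fun hcon => hcon.elim h1 h2)]
      rfl

-- MAIN LEMMA: A's token loop over positions equals B's character fold on the suffix
theorem formLoop_eq (t : List Char) (swd : Bool) (al : PySem.Set Char)
    (kw : List (List Char)) (j : Nat) (d : PySem.Dict (List Char) Int) :
    formLoop j t swd al kw d = foldFlush swd al kw d [] (t.drop j) := by
  by_cases hl : j < t.length
  · have hdrop : t.drop j = t[j] :: t.drop (j + 1) := List.drop_eq_getElem_cons hl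
    have hgetD : t.getD j ' ' = t[j] := List.getD_eq_getElem t ' ' hl
    by_cases hc : PySem.Set.contains al (t.getD j ' ') = true
    · -- a token starts at position j
      have hskip : skipNonAlpha j t al = j := by
        rw [skipNonAlpha, dif_neg]
        exact fun hcon => hcon.2 hc
      have hej : j + 1 ≤ getTokenEnd j t al := getTokenEnd_gt j t al hl hc
      obtain ⟨htw, hdw⟩ := tokenEnd_takeWhile j t al
      have htkcons : (t.drop j).takeWhile (PySem.Set.contains al)
          = t[j] :: (t.drop (j + 1)).takeWhile (PySem.Set.contains al) := by
        rw [hdrop, List.takeWhile_cons_of_pos (hgetD ▸ hc)]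
      -- B's side: consume the whole token, then flush it
      have hB : foldFlush swd al kw d [] (t.drop j)
          = foldFlush swd al kw
              (flushTok swd kw d ((t.drop j).takeWhile (PySem.Set.contains al))) []
              (t.drop (getTokenEnd j t al)) := by
        rw [foldFlush_run, hdw, List.nil_append, foldFlush_flush]
        rcases hD : t.drop (getTokenEnd j t al) with _ | ⟨c, s'⟩
        · exact Or.inl rfl
        · refine Or.inr ⟨c, s', rfl, ?_⟩
          have hdw' : (t.drop j).dropWhile (PySem.Set.contains al) = c :: s' := by
            rw [hdw, hD]
          have hne : (t.drop j).dropWhile (PySem.Set.contains al) ≠ [] := by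
            rw [hdw']; simp
          have hhead := List.head_dropWhile_not (PySem.Set.contains al) hne
          have hceq : ((t.drop j).dropWhile (PySem.Set.contains al)).head hne = c := by
            simp [hdw']
          rwa [hceq] at hhead
      by_cases hd : swd = false ∧ PySem.Chars.isdigit (t.getD j ' ') = true
      · -- digit-led token: A skips it inside get_token_start, B's flush rejects it
        have hstart : getTokenStart j t swd al = getTokenStart (getTokenEnd j t al) t swd al := by
          rw [getTokenStart, hskip, dif_pos ⟨hl, hd.1, hd.2⟩]
        have hA : formLoop j t swd al kw d = formLoop (getTokenEnd j t al) t swd al kw d := by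
          rw [formLoop]
          conv_rhs => rw [formLoop]
          rw [hstart]
        have hfl : flushTok swd kw d ((t.drop j).takeWhile (PySem.Set.contains al)) = d := by
          rw [htkcons]
          unfold flushTok
          rw [if_neg (by simp), if_pos]
          refine ⟨hd.1, ?_⟩
          have hd2 : PySem.Chars.isdigit t[j] = true := hgetD ▸ hd.2
          simpa using hd2
        rw [hA, hB, hfl,
          formLoop_eq t swd al kw (getTokenEnd j t al) d]
      · -- counted token: A counts text[j : getTokenEnd j], B flushes the same run
        have hstart : getTokenStart j t swd al = j := by
          rw [getTokenStart, hskip, dif_neg]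
          intro hcon
          exact hd ⟨hcon.2.1, hcon.2.2⟩
        have hA : formLoop j t swd al kw d
            = formLoop (getTokenEnd j t al) t swd al kw
                (countTok kw d
                  (PySem.List.slice t (some (j : Int)) (some ((getTokenEnd j t al : Nat) : Int)))) := by
          rw [formLoop, hstart, dif_pos hl]
        have hslice : PySem.List.slice t (some (j : Int)) (some ((getTokenEnd j t al : Nat) : Int))
            = (t.drop j).takeWhile (PySem.Set.contains al) := by
          rw [PySem.List.slice_natCast, htw]
        have hfl : countTok kw d ((t.drop j).takeWhile (PySem.Set.contains al))
            = flushTok swd kw d ((t.drop j).takeWhile (PySem.Set.contains al)) := by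
          apply countTok_eq_flushTok
          · rw [htkcons]; simp
          · rw [htkcons]
            have hd' : ¬ (swd = false ∧ PySem.Chars.isdigit t[j] = true) := by
              rw [hgetD] at hd; exact hd
            intro hcon
            exact hd' ⟨hcon.1, by simpa using hcon.2⟩
        rw [hA, hslice, hfl, hB,
          formLoop_eq t swd al kw (getTokenEnd j t al) (flushTok swd kw d ((t.drop j).takeWhile (PySem.Set.contains al)))]
    · -- separator at position j: both sides step over it
      have hskip : skipNonAlpha j t al = skipNonAlpha (j + 1) t al := by
        rw [skipNonAlpha, dif_pos ⟨hl, by simpa using hc⟩]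
      have hstart : getTokenStart j t swd al = getTokenStart (j + 1) t swd al := by
        rw [getTokenStart]
        conv_rhs => rw [getTokenStart]
        rw [hskip]
      have hA : formLoop j t swd al kw d = formLoop (j + 1) t swd al kw d := by
        rw [formLoop]
        conv_rhs => rw [formLoop]
        rw [hstart]
      have hB : foldFlush swd al kw d [] (t.drop j) = foldFlush swd al kw d [] (t.drop (j + 1)) := by
        rw [hdrop]
        unfold foldFlush
        rw [List.foldl_cons, if_neg (by rw [hgetD] at hc; simpa using hc), flushTok_nil]
      rw [hA, hB, formLoop_eq t swd al kw (j + 1) d]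
  · -- past the end: both sides are done
    have hnil : t.drop j = [] := List.drop_eq_nil_of_le (by omega)
    have hskip : skipNonAlpha j t al = j := by
      rw [skipNonAlpha, dif_neg]
      intro hcon
      exact hl hcon.1
    have hstart : getTokenStart j t swd al = j := by
      rw [getTokenStart, hskip, dif_neg]
      intro hcon
      exact hl hcon.1
    rw [formLoop, hstart, dif_neg hl, hnil]
    simp [foldFlush, flushTok_nil]
termination_by t.length - j
decreasing_by
  · omega
  · omega
  · omega

theorem perLine (swd : Bool) (al : PySem.Set Char) (kw : List (List Char))
    (d : PySem.Dict (List Char) Int) (line : List Char) :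
    formLoop 0 line swd al kw d = lineScan swd al kw d line := by
  rw [lineScan_eq_foldFlush, formLoop_eq, List.drop_zero]

-- ===== VERDICT (by name: the statement is the Claim_ definition above) =====
theorem identificators_spec : Claim_equal_identificators := by
  intro n cs swd keywords text _
  unfold Spec_identificators
  simp only [identificators, identificators_alt, alpha_eq]
  have hfun : (fun (d : PySem.Dict (List Char) Int) (line : String) =>
        formLoop 0 line.toList swd (altAlpha cs) (keywords.map String.toList) d)
      = (fun (d : PySem.Dict (List Char) Int) (line : String) =>
        lineScan swd (altAlpha cs) (keywords.map String.toList) d line.toList) := by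
    funext d line
    exact perLine swd (altAlpha cs) (keywords.map String.toList) d line.toList
  rw [hfun]
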